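-- pv_equiv track=rewrite | github.com/pypi-data/pypi-mirror-361 | packages/gresit/gresit-1.0.0-py3-none-any.whl/gresit/group_pc.py | _remove_pairs_after_key
-- ===== SOURCE A (Python) =====
-- def _remove_pairs_after_key(
--     layering: dict[str, list[str]], max_layer: str
-- ) -> dict[str, list[str]]:
--     items = list(layering.items())
--     # Find the index of the target key
--     try:
--         target_index = next(i for i, (key, _) in enumerate(items) if key == max_layer)
--     except StopIteration:
--         # If the target key is not found, return the original dictionary
--         return layering
--
--     # Recreate the dictionary up to and including the target key
--     return dict(items[: target_index + 1])
-- ===== SOURCE B (Python) =====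
-- def _remove_pairs_after_key(layering, max_layer):
--     result = {}
--     found = False
--     for key, value in layering.items():
--         result[key] = value
--         if key == max_layer:
--             found = True
--             break
--     return result if found else layering
-- ===== Notes on version B (the rewrite author's own statement) =====
-- stated objective: simpler
-- what changed: Replaces A's two-phase enumerate+next index search followed by list slicing and dict() rebuild with a single accumulating pass that copies entries into a new dict and stops as soon as the target key is inserted, returning the original dict when the key is absent.
import Mathlib
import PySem

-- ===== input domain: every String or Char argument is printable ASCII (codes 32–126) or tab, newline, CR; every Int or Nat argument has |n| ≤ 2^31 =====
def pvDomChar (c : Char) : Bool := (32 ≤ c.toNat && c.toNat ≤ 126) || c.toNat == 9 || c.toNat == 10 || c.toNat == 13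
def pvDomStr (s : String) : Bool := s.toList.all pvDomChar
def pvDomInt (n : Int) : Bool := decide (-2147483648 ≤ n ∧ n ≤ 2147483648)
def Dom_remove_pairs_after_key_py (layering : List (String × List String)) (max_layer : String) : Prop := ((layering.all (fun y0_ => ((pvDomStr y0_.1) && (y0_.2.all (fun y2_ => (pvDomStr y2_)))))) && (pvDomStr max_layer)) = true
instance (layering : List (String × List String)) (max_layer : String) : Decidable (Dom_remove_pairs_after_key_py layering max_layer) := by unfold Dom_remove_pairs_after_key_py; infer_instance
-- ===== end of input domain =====

-- B replaces A's two-phase "enumerate+next to find the index, then slice and rebuild a dict"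
-- with a single accumulating pass that copies entries and stops at the target key (objective: simpler).

-- ===== PORT A =====
-- items = list(layering.items()); target_index = next(i for i, (key, _) in enumerate(items) if key == max_layer)
-- except StopIteration: return layering; else return dict(items[: target_index + 1])
def remove_pairs_after_key_py (layering : List (String × List String)) (max_layer : String) : List (String × List String) :=
  let items := layering
  match (PySem.List.enumerate items).find? (fun p => p.2.1 == max_layer) with
  | none => layering
  | some (i, _) => (PySem.Dict.ofList (PySem.List.slice items none (some (i + 1)))).items

-- ===== PORT B =====
-- the for-loop of Source B: carry (result, found); insert each entry, break (stop recursing) once key == max_layer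
def removeLoopB (max_layer : String) (result : PySem.Dict String (List String)) :
    List (String × List String) → PySem.Dict String (List String) × Bool
  | [] => (result, false)
  | (key, value) :: rest =>
      let result := result.insert key value
      if key == max_layer then (result, true) else removeLoopB max_layer result rest

def remove_pairs_after_key_py_alt (layering : List (String × List String)) (max_layer : String) : List (String × List String) :=
  let r := removeLoopB max_layer PySem.Dict.empty layering
  if r.2 then r.1.items else layering

-- ===== PRECONDITION & SPEC =====
-- The arguments come from a Python dict, whose keys are necessarily distinct; an association
-- list with duplicate keys represents no Python input, so Pre_ requires the keys to be distinct.
def Pre_remove_pairs_after_key_py (layering : List (String × List String)) (max_layer : String) : Prop :=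
  (layering.map Prod.fst).Nodup
instance (layering : List (String × List String)) (max_layer : String) : Decidable (Pre_remove_pairs_after_key_py layering max_layer) := by unfold Pre_remove_pairs_after_key_py; infer_instance

def pvWitness_remove_pairs_after_key_py : (List (String × List String)) × String :=
  ([("a", ["x"]), ("b", ["y"]), ("c", [])], "b")

def Spec_remove_pairs_after_key_py (layering : List (String × List String)) (max_layer : String) (out : List (String × List String)) : Prop := out = remove_pairs_after_key_py_alt layering max_layer
instance (layering : List (String × List String)) (max_layer : String) (out : List (String × List String)) : Decidable (Spec_remove_pairs_after_key_py layering max_layer out) := by unfold Spec_remove_pairs_after_key_py; infer_instance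

-- ===== CLAIM (what is proved, stated in full; the proofs are below) =====
def Claim_equal_remove_pairs_after_key_py : Prop := ∀ (layering : List (String × List String)) (max_layer : String), Dom_remove_pairs_after_key_py layering max_layer → Pre_remove_pairs_after_key_py layering max_layer → Spec_remove_pairs_after_key_py layering max_layer (remove_pairs_after_key_py layering max_layer)

-- ===== LEMMAS AND PROOFS =====

-- A's generator-with-enumerate search, as a function of the start offset, is findIdx? plus the element.
theorem enum_find_eq (max_layer : String) (l : List (String × List String)) :
    ∀ s : Int, (PySem.List.enumerate l s).find? (fun p => p.2.1 == max_layer)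
      = (l.findIdx? (fun p => p.1 == max_layer)).map (fun (n : Nat) => (((s + n : Int) : Int), l.getD n ("", []))) := by
  induction l with
  | nil => intro s; simp [PySem.List.enumerate]
  | cons x xs ih =>
      intro s
      rw [PySem.List.enumerate_cons, List.find?_cons, List.findIdx?_cons]
      by_cases h : x.1 == max_layer
      · simp [h]

      · simp only [h, Bool.false_eq_true, ite_false, ih (s + 1), Option.map_map]
        congr 1
        funext n
        simp only [Function.comp, List.getD_cons_succ, Prod.mk.injEq]
        exact ⟨by omega, trivial⟩

-- dict() of a list with distinct keys has exactly that items list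
theorem items_ofList_nodup (l : List (String × List String)) (h : (l.map Prod.fst).Nodup) :
    (PySem.Dict.ofList l).items = l := by
  have hfold : PySem.Dict.ofList l = l.foldl (fun d p => d.insert p.1 p.2) PySem.Dict.empty := by
    simp [PySem.Dict.ofList, PySem.Dict.update]
  rw [hfold]
  have := PySem.Dict.items_foldl_insert_fresh (l := l) (d := PySem.Dict.empty)
    (k := Prod.fst) (v := Prod.snd) (by intro a _; simp) (h)
  simpa using this

-- closed form of A (under distinct keys): cut the list after the first occurrence of the key
theorem portA_eq (layering : List (String × List String)) (max_layer : String)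
    (h : (layering.map Prod.fst).Nodup) :
    remove_pairs_after_key_py layering max_layer
      = match layering.findIdx? (fun p => p.1 == max_layer) with
        | none => layering
        | some n => layering.take (n + 1) := by
  show (match (PySem.List.enumerate layering).find? (fun p => p.2.1 == max_layer) with
        | none => layering
        | some (i, _) => (PySem.Dict.ofList (PySem.List.slice layering none (some (i + 1)))).items)
      = (match layering.findIdx? (fun p => p.1 == max_layer) with
        | none => layering
        | some n => layering.take (n + 1))
  rw [enum_find_eq max_layer layering 0]
  cases hf : layering.findIdx? (fun p => p.1 == max_layer) with
  | none => simp
  | some n =>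
      simp only [Option.map_some]
      have hcast : (0 : Int) + (n : Int) + 1 = ((n + 1 : Nat) : Int) := by push_cast; ring
      rw [hcast, PySem.List.slice_to_natCast]
      exact items_ofList_nodup _ (by
        have : ((layering.take (n+1)).map Prod.fst) = (layering.map Prod.fst).take (n+1) := by
          simp [List.map_take]
        rw [this]; exact h.sublist (List.take_sublist _ _))

-- the loop of B: found = whether the key occurs, and on success the result dict's items are the cut prefix
theorem loopB_eq (max_layer : String) :
    ∀ (l : List (String × List String)) (d : PySem.Dict String (List String)),
      (∀ k ∈ l.map Prod.fst, d.contains k = false) → (l.map Prod.fst).Nodup →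
      ((removeLoopB max_layer d l).2 = (l.findIdx? (fun p => p.1 == max_layer)).isSome) ∧
      (∀ n, l.findIdx? (fun p => p.1 == max_layer) = some n →
        (removeLoopB max_layer d l).1.items = d.items ++ l.take (n + 1)) := by
  intro l
  induction l with
  | nil => intro d _ _; simp [removeLoopB]
  | cons x xs ih =>
      intro d hfresh hnd
      obtain ⟨k, v⟩ := x
      by_cases h : k == max_layer
      · refine ⟨by simp [removeLoopB, h, List.findIdx?_cons], ?_⟩
        intro n hn
        rw [List.findIdx?_cons] at hn
        simp only [h, if_pos] at hn
        injection hn with hn0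
        subst hn0
        simp only [removeLoopB, h, if_pos]
        rw [PySem.Dict.items_insert_of_not_contains d v (hfresh k (by simp))]
        simp
      · have hfresh' : ∀ a ∈ xs.map Prod.fst, (d.insert k v).contains a = false := by
          intro a ha
          rw [PySem.Dict.contains_insert]
          have hak : a ≠ k := by
            intro he; subst he
            exact (List.nodup_cons.mp (by simpa using hnd)).1 ha
          simp [hak, hfresh a (by simp [ha])]
        have hnd' : (xs.map Prod.fst).Nodup := (List.nodup_cons.mp (by simpa using hnd)).2
        have ihx := ih (d.insert k v) hfresh' hnd'
        constructor
        · simp only [removeLoopB, h, Bool.false_eq_true, ite_false, List.findIdx?_cons]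
          rw [ihx.1]
          simp
        · intro n hn
          rw [List.findIdx?_cons] at hn
          simp only [h, Bool.false_eq_true, ite_false] at hn
          cases hx : xs.findIdx? (fun p => p.1 == max_layer) with
          | none => rw [hx] at hn; simp at hn
          | some m =>
              rw [hx] at hn
              simp only [Option.map_some] at hn
              injection hn with hn0
              subst hn0
              simp only [removeLoopB, h, Bool.false_eq_true, ite_false]
              rw [ihx.2 m hx]
              rw [PySem.Dict.items_insert_of_not_contains d v (hfresh k (by simp))]
              simp [List.take_succ_cons]

-- ===== VERDICT (by name: the statement is the Claim_ definition above) =====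
theorem remove_pairs_after_key_py_spec : Claim_equal_remove_pairs_after_key_py := by
  intro layering max_layer _ hpre
  unfold Spec_remove_pairs_after_key_py
  have hA := portA_eq layering max_layer hpre
  have hB := loopB_eq max_layer layering PySem.Dict.empty (by intro k _; simp) hpre
  unfold remove_pairs_after_key_py_alt
  cases hf : layering.findIdx? (fun p => p.1 == max_layer) with
  | none =>
      rw [hA, hf]
      have : (removeLoopB max_layer PySem.Dict.empty layering).2 = false := by
        rw [hB.1, hf]; rfl
      simp [this]
  | some n =>
      rw [hA, hf]
      have h2 : (removeLoopB max_layer PySem.Dict.empty layering).2 = true := by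
        rw [hB.1, hf]; rfl
      have h1 := hB.2 n hf
      have he : (PySem.Dict.empty : PySem.Dict String (List String)).items = [] := rfl
      rw [he, List.nil_append] at h1
      simp [h2, h1]
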